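-- pv_equiv track=rewrite | github.com/zesonzhang/project-voice | tools/simple_simulator_ja.py | calculate_binned_frequency
-- ===== SOURCE A (Python) =====
-- from collections import Counter
--
-- def calculate_binned_frequency(lengths_list, num_individual_bins=5):
--   """
--     Calculates the frequency for predefined bins: 1, 2, ..., num_individual_bins,
--     and a final '(num_individual_bins + 1)+' bin.
--     Returns a dictionary where keys are bin names (e.g., 'Freq_1', 'Freq_5', 'Freq_6plus')
--     and values are the counts.
--     """
--   bin_keys = [f"Freq_{i}" for i in range(1, num_individual_bins + 1)]
--   bin_keys.append(f"Freq_{num_individual_bins + 1}plus")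
--
--   binned_counts = {key: 0 for key in bin_keys}
--
--   if not lengths_list:
--     return binned_counts
--
--   counts = Counter(lengths_list)
--   for length, count in counts.items():
--     if length <= num_individual_bins:
--       binned_counts[f"Freq_{length}"] += count
--     else:
--       binned_counts[f"Freq_{num_individual_bins + 1}plus"] += count
--   return binned_counts
-- ===== SOURCE B (Python) =====
-- def calculate_binned_frequency(lengths_list, num_individual_bins=5):
--   binned_counts = {
--       f"Freq_{i}": lengths_list.count(i)
--       for i in range(1, num_individual_bins + 1)
--   }
--   binned_counts[f"Freq_{num_individual_bins + 1}plus"] = sum(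
--       1 for x in lengths_list if x > num_individual_bins)
--   return binned_counts
-- ===== Notes on version B (the rewrite author's own statement) =====
-- stated objective: simpler
-- what changed: B never groups the data: instead of building a Counter of lengths_list and folding its items into a zero-initialized dict, it loops over the BINS, computing each individual bin directly as lengths_list.count(i) in a dict comprehension and the overflow bin as a generator-sum of elements > num_individual_bins.
import Mathlib
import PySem

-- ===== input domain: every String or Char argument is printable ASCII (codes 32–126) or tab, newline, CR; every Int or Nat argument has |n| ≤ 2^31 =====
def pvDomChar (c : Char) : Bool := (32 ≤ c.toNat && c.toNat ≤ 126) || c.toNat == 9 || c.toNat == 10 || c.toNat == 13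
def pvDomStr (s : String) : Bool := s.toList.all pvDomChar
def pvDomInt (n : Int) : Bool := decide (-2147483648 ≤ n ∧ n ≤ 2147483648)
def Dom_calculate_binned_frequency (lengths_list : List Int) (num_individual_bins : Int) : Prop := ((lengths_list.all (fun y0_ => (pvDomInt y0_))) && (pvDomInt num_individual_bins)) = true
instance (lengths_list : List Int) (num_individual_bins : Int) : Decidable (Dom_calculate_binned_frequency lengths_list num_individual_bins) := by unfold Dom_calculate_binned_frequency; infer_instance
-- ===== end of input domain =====

-- B inverts the traversal: instead of grouping the data (Counter, then fold the groups into a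
-- zero-initialized dict), it loops over the BINS, computing each bin as lengths_list.count(i)
-- and the overflow bin as a sum over elements > num_individual_bins.

-- ===== PORT A =====
-- 'binned_counts[key] += c' is ported as insert key (getD key 0 + c): exact wherever the key is
-- present (Python raises KeyError otherwise; those inputs are excluded by Pre_).
def calculate_binned_frequency (lengths_list : List Int) (num_individual_bins : Int) : List (String × Int) :=
  let bin_keys : List String :=
    (PySem.List.pyRange 1 (num_individual_bins + 1)).map (fun i => "Freq_" ++ PySem.Int.toStr i)
  let bin_keys := bin_keys ++ ["Freq_" ++ PySem.Int.toStr (num_individual_bins + 1) ++ "plus"]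
  let binned_counts : PySem.Dict String Int :=
    bin_keys.foldl (fun d k => d.insert k 0) PySem.Dict.empty
  if lengths_list = [] then binned_counts.items
  else
    let counts := PySem.Dict.counter lengths_list
    (counts.items.foldl (fun d p =>
      if p.1 ≤ num_individual_bins then
        d.insert ("Freq_" ++ PySem.Int.toStr p.1)
          (d.getD ("Freq_" ++ PySem.Int.toStr p.1) 0 + p.2)
      else
        d.insert ("Freq_" ++ PySem.Int.toStr (num_individual_bins + 1) ++ "plus")
          (d.getD ("Freq_" ++ PySem.Int.toStr (num_individual_bins + 1) ++ "plus") 0 + p.2))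
      binned_counts).items

-- ===== PORT B =====
-- the dict comprehension over range(1, bins+1) with lengths_list.count(i), then the generator-sum
-- 'sum(1 for x in lengths_list if x > bins)' ported as the corresponding foldl.
def calculate_binned_frequency_alt (lengths_list : List Int) (num_individual_bins : Int) : List (String × Int) :=
  let binned_counts : PySem.Dict String Int :=
    (PySem.List.pyRange 1 (num_individual_bins + 1)).foldl
      (fun d i => d.insert ("Freq_" ++ PySem.Int.toStr i) ((PySem.List.count lengths_list i : Nat) : Int))
      PySem.Dict.empty
  (binned_counts.insert ("Freq_" ++ PySem.Int.toStr (num_individual_bins + 1) ++ "plus")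
      (lengths_list.foldl (fun acc x => if num_individual_bins < x then acc + 1 else acc) (0 : Int))).items

-- ===== PRECONDITION & SPEC =====
-- Pre_ excludes exactly the inputs where A raises KeyError: a length below 1 that still falls in
-- the 'individual' range (length ≤ num_individual_bins), whose key 'Freq_<length>' is absent.
def Pre_calculate_binned_frequency (lengths_list : List Int) (num_individual_bins : Int) : Prop :=
  ∀ l ∈ lengths_list, 1 ≤ l ∨ num_individual_bins < l
instance (lengths_list : List Int) (num_individual_bins : Int) : Decidable (Pre_calculate_binned_frequency lengths_list num_individual_bins) := by unfold Pre_calculate_binned_frequency; infer_instance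
def pvWitness_calculate_binned_frequency : List Int × Int := ([1, 2, 2, 9, 7, 3], 5)
def Spec_calculate_binned_frequency (lengths_list : List Int) (num_individual_bins : Int) (out : List (String × Int)) : Prop := out = calculate_binned_frequency_alt lengths_list num_individual_bins
instance (lengths_list : List Int) (num_individual_bins : Int) (out : List (String × Int)) : Decidable (Spec_calculate_binned_frequency lengths_list num_individual_bins out) := by unfold Spec_calculate_binned_frequency; infer_instance

-- ===== CLAIM (what is proved, stated in full; the proofs are below) =====
def Claim_equal_calculate_binned_frequency : Prop := ∀ (lengths_list : List Int) (num_individual_bins : Int), Dom_calculate_binned_frequency lengths_list num_individual_bins → Pre_calculate_binned_frequency lengths_list num_individual_bins → Spec_calculate_binned_frequency lengths_list num_individual_bins (calculate_binned_frequency lengths_list num_individual_bins)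

-- ===== LEMMAS AND PROOFS =====

-- ---- decimal digit strings: Nat.toDigits 10 is injective and produces only digits ----

theorem pv_tdc_shift : ∀ (f n : Nat) (l : List Char), n < f →
    Nat.toDigitsCore 10 f n l = Nat.toDigitsCore 10 f n [] ++ l := by
  intro f
  induction f with
  | zero => intro n l h; omega
  | succ f ih =>
    intro n l hn
    simp only [Nat.toDigitsCore]
    by_cases h10 : n / 10 = 0
    · simp [h10]
    · have hn0 : n ≠ 0 := fun h => h10 (by simp [h])
      have hlt : n / 10 < f := by
        have h1 : n / 10 < n := Nat.div_lt_self (by omega) (by omega)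
        omega
      rw [if_neg h10, if_neg h10]
      rw [ih (n / 10) _ hlt, ih (n / 10) [(n % 10).digitChar] hlt]
      simp

theorem pv_digitChar_isDigit (m : Nat) (h : m < 10) : (Nat.digitChar m).isDigit = true := by
  interval_cases m <;> decide

theorem pv_digitChar_val (m : Nat) (h : m < 10) : (Nat.digitChar m).toNat - 48 = m := by
  interval_cases m <;> decide

theorem pv_tdc_digits : ∀ (f n : Nat), n < f →
    ∀ c ∈ Nat.toDigitsCore 10 f n [], c.isDigit = true := by
  intro f
  induction f with
  | zero => intro n h; omega
  | succ f ih =>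
    intro n hn c hc
    simp only [Nat.toDigitsCore] at hc
    by_cases h10 : n / 10 = 0
    · rw [if_pos h10] at hc
      simp at hc
      rw [hc]
      exact pv_digitChar_isDigit _ (Nat.mod_lt _ (by omega))
    · have hn0 : n ≠ 0 := fun h => h10 (by simp [h])
      have hlt : n / 10 < f := by
        have h1 : n / 10 < n := Nat.div_lt_self (by omega) (by omega)
        omega
      rw [if_neg h10, pv_tdc_shift f (n / 10) _ hlt] at hc
      rcases List.mem_append.mp hc with h | h
      · exact ih (n / 10) hlt c h
      · simp at h
        rw [h]
        exact pv_digitChar_isDigit _ (Nat.mod_lt _ (by omega))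

def pvDecV (l : List Char) : Nat := l.foldl (fun a c => a * 10 + (c.toNat - 48)) 0

theorem pv_decV_append (xs : List Char) (c : Char) :
    pvDecV (xs ++ [c]) = pvDecV xs * 10 + (c.toNat - 48) := by
  simp [pvDecV, List.foldl_append]

theorem pv_tdc_dec : ∀ (f n : Nat), n < f → pvDecV (Nat.toDigitsCore 10 f n []) = n := by
  intro f
  induction f with
  | zero => intro n h; omega
  | succ f ih =>
    intro n hn
    simp only [Nat.toDigitsCore]
    by_cases h10 : n / 10 = 0
    · rw [if_pos h10]
      have h1 : pvDecV [(n % 10).digitChar] = (n % 10).digitChar.toNat - 48 := by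
        simp [pvDecV]
      rw [h1, pv_digitChar_val _ (Nat.mod_lt _ (by omega))]
      omega
    · have hn0 : n ≠ 0 := fun h => h10 (by simp [h])
      have hlt : n / 10 < f := by
        have h1 : n / 10 < n := Nat.div_lt_self (by omega) (by omega)
        omega
      rw [if_neg h10, pv_tdc_shift f (n / 10) _ hlt, pv_decV_append,
        ih (n / 10) hlt, pv_digitChar_val _ (Nat.mod_lt _ (by omega))]
      omega

theorem pv_toDigits_inj (a b : Nat) (h : Nat.toDigits 10 a = Nat.toDigits 10 b) : a = b := by
  have ha := pv_tdc_dec (a + 1) a (by omega)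
  have hb := pv_tdc_dec (b + 1) b (by omega)
  unfold Nat.toDigits at h
  rw [h] at ha
  rw [ha] at hb
  omega

theorem pv_toChars_nonneg (a : Int) (h : 0 ≤ a) :
    PySem.Int.toChars a = Nat.toDigits 10 a.toNat := by
  simp [PySem.Int.toChars, show ¬ a < 0 by omega]

theorem pv_F_inj (a b : Int) (ha : 0 ≤ a) (hb : 0 ≤ b)
    (h : "Freq_" ++ PySem.Int.toStr a = "Freq_" ++ PySem.Int.toStr b) : a = b := by
  have h' := congrArg String.toList h
  rw [String.toList_append, String.toList_append, PySem.Int.toList_toStr,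
    PySem.Int.toList_toStr, pv_toChars_nonneg a ha, pv_toChars_nonneg b hb] at h'
  have h2 := List.append_cancel_left h'
  have := pv_toDigits_inj _ _ h2
  omega

theorem pv_F_ne_plus (a m : Int) (ha : 0 ≤ a) :
    "Freq_" ++ PySem.Int.toStr a ≠ "Freq_" ++ PySem.Int.toStr m ++ "plus" := by
  intro h
  have h' := congrArg String.toList h
  rw [String.toList_append, String.toList_append, String.toList_append,
    PySem.Int.toList_toStr, PySem.Int.toList_toStr, pv_toChars_nonneg a ha,
    List.append_assoc] at h'
  have h2 := List.append_cancel_left h'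
  have hs : 's' ∈ Nat.toDigits 10 a.toNat := by
    rw [h2]
    simp [show ("plus" : String).toList = ['p', 'l', 'u', 's'] by decide]
  have := pv_tdc_digits (a.toNat + 1) a.toNat (by omega) 's' hs
  simp at this

-- ---- small set/dict helpers specific to the two programs ----

theorem pv_update_eq_self (s : PySem.Set String) (m : List String) (h : ∀ x ∈ m, x ∈ s) :
    PySem.Set.update s m = s := by
  induction m generalizing s with
  | nil => rfl
  | cons x t ih =>
    have hx : PySem.Set.update s (x :: t) = PySem.Set.update (s.add x) t := rfl
    rw [hx, PySem.Set.add_of_mem (h x (by simp)), ih s (fun y hy => h y (by simp [hy]))]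

-- lookup after an accumulate-fold: initial value plus the total weight routed to that key
theorem pv_foldl_acc_get? {α : Type} (key : α → String) (w : α → Int) :
    ∀ (l : List α) (d : PySem.Dict String Int) (q : String),
    (l.foldl (fun d x => d.insert (key x) (d.getD (key x) 0 + w x)) d).get? q =
      if q ∈ l.map key then
        some (d.getD q 0 + ((l.filter (fun x => key x = q)).map w).sum)
      else d.get? q
  | [], d, q => by simp
  | x :: t, d, q => by
    rw [List.foldl_cons, pv_foldl_acc_get? key w t _ q]
    by_cases hq : key x = q
    · subst hq
      by_cases hmem : key x ∈ t.map key
      · rw [if_pos hmem, if_pos (by simp), PySem.Dict.getD_insert_self]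
        have hfil : (x :: t).filter (fun y => decide (key y = key x))
            = x :: t.filter (fun y => decide (key y = key x)) := by simp
        rw [hfil, List.map_cons, List.sum_cons, add_assoc]
      · have hzero : t.filter (fun y => decide (key y = key x)) = [] := by
          rw [List.filter_eq_nil_iff]
          intro y hy hdec
          exact hmem (List.mem_map.mpr ⟨y, hy, by simpa using hdec⟩)
        rw [if_neg hmem, if_pos (by simp), PySem.Dict.get?_insert_self]
        have hfil : (x :: t).filter (fun y => decide (key y = key x)) = [x] := by
          simp [hzero]
        rw [hfil]
        simp
    · have hne : q ≠ key x := Ne.symm hq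
      rw [PySem.Dict.getD_insert_of_ne d _ _ hne, PySem.Dict.get?_insert_of_ne d _ hne]
      have hfil : (x :: t).filter (fun y => decide (key y = q))
          = t.filter (fun y => decide (key y = q)) := by simp [hq]
      have hc : (q ∈ (x :: t).map key) ↔ q ∈ t.map key := by
        simp only [List.map_cons, List.mem_cons]
        constructor
        · rintro (h | h)
          · exact absurd h.symm hq
          · exact h
        · exact Or.inr
      rw [hfil]
      by_cases hmem : q ∈ t.map key
      · rw [if_pos hmem, if_pos (hc.mpr hmem)]
      · rw [if_neg hmem, if_neg (fun h => hmem (hc.mp h))]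

-- summing the multiplicities of the distinct elements selected by P counts the selected occurrences
theorem pv_sum_count_general (P : Int → Bool) (S : List Int) (hS : S.Nodup) :
    ∀ (xs : List Int),
    ((S.filter P).map (fun v => (xs.count v : Int))).sum =
      ((xs.filter (fun x => P x && decide (x ∈ S))).length : Int)
  | [] => by simp
  | x :: xs => by
    have hsplit : ((S.filter P).map (fun v => (((x :: xs).count v : Nat) : Int))).sum
        = ((S.filter P).map (fun v => (xs.count v : Int))).sum
          + ((S.filter P).map (fun v => if v = x then (1 : Int) else 0)).sum := by
      rw [← PySem.List.sum_map_add_int]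
      apply congrArg
      apply List.map_congr_left
      intro v hv
      rw [List.count_cons]
      by_cases h : v = x
      · simp [h]
      · simp [h, Ne.symm h]
    rw [hsplit, pv_sum_count_general P S hS xs]
    have hcnt : ((S.filter P).map (fun v => if v = x then (1 : Int) else 0)).sum
        = if P x && decide (x ∈ S) then (1 : Int) else 0 := by
      have h1 := PySem.List.sum_map_ite_one_zero (fun v => decide (v = x)) (S.filter P)
      simp only [decide_eq_true_eq] at h1
      rw [h1]
      have h2 : (S.filter P).countP (fun v => decide (v = x)) = (S.filter P).count x := by
        simp [List.count]
        rfl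
      rw [h2]
      by_cases hx : P x ∧ x ∈ S
      · have : x ∈ S.filter P := List.mem_filter.mpr ⟨hx.2, hx.1⟩
        rw [List.count_eq_one_of_mem (hS.filter P) this]
        simp [hx.1, hx.2]
      · have : x ∉ S.filter P := fun h => hx ⟨(List.mem_filter.mp h).2, (List.mem_filter.mp h).1⟩
        rw [List.count_eq_zero_of_not_mem this]
        by_cases h1 : P x <;> by_cases h2 : x ∈ S <;> simp [h1, h2] at hx ⊢
    rw [hcnt, List.filter_cons]
    by_cases hPx : (P x && decide (x ∈ S)) = true <;> simp [hPx]

theorem pv_sum_count_filter (xs : List Int) (P : Int → Bool) :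
    (((PySem.Set.ofList xs).filter P).map (fun v => (xs.count v : Int))).sum =
      ((xs.filter P).length : Int) := by
  rw [pv_sum_count_general P (PySem.Set.ofList xs) (PySem.Set.nodup_ofList xs) xs]
  congr 2
  apply List.filter_congr
  intro x hx
  simp [(PySem.Set.mem_ofList xs x).mpr hx]

-- ===== VERDICT (by name: the statement is the Claim_ definition above) =====
theorem calculate_binned_frequency_spec : Claim_equal_calculate_binned_frequency := by
  intro xs bins _ hpre
  unfold Spec_calculate_binned_frequency calculate_binned_frequency calculate_binned_frequency_alt
  simp only []
  set F : Int → String := fun i => "Freq_" ++ PySem.Int.toStr i with hF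
  set plus := "Freq_" ++ PySem.Int.toStr (bins + 1) ++ "plus" with hplus
  set rk := PySem.List.pyRange 1 (bins + 1) with hrk
  set kf : Int → String := fun l => if l ≤ bins then F l else plus with hkf
  -- bounds of the range and key-separation facts
  have hmem : ∀ i ∈ rk, 1 ≤ i ∧ i ≤ bins := by
    intro i hi
    have := PySem.List.mem_pyRange_one.mp hi
    omega
  have hnodmap : (rk.map F).Nodup := by
    refine List.Nodup.map_on ?_ (PySem.List.nodup_pyRange_one 1 (bins + 1))
    intro i hi j hj hij
    exact pv_F_inj i j (by have := hmem i hi; omega) (by have := hmem j hj; omega) hij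
  have hplusnot : plus ∉ rk.map F := by
    intro h
    obtain ⟨i, hi, hFi⟩ := List.mem_map.mp h
    exact pv_F_ne_plus i (bins + 1) (by have := hmem i hi; omega) hFi
  -- the zero-initialized dict of A
  set init : PySem.Dict String Int :=
    (rk.map F).foldl (fun d k => d.insert k 0) PySem.Dict.empty with hinit
  set d0 : PySem.Dict String Int := init.insert plus 0 with hd0
  have hinitA : ((rk.map F) ++ [plus]).foldl (fun d k => d.insert k 0) PySem.Dict.empty = d0 := by
    rw [List.foldl_append]
    rfl
  have hinit_items : init.items = rk.map (fun i => (F i, (0 : Int))) := by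
    rw [hinit, List.foldl_map,
      PySem.Dict.items_foldl_insert_fresh rk F (fun _ => (0 : Int)) PySem.Dict.empty
        (by intro a _; simp [pysem]) hnodmap]
    simp [pysem]
    rfl
  have hinit_keys : init.keys = rk.map F := by
    simp only [PySem.Dict.keys, hinit_items, List.map_map]
    rfl
  have hcontplus : init.contains plus = false := by
    rw [PySem.Dict.contains_eq_decide_mem_keys, hinit_keys]
    simpa using hplusnot
  have hd0items : d0.items = rk.map (fun i => (F i, (0 : Int))) ++ [(plus, 0)] := by
    rw [hd0, PySem.Dict.items_insert_of_not_contains init 0 hcontplus, hinit_items]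
  have hd0keys : d0.keys = rk.map F ++ [plus] := by
    simp only [PySem.Dict.keys, hd0items, List.map_append, List.map_map]
    rfl
  have hd0nodup : d0.keys.Nodup := by
    rw [hd0keys]
    refine List.Nodup.append hnodmap (List.nodup_singleton _) ?_
    simpa using hplusnot
  have hq0 : ∀ q ∈ d0.keys, d0.get? q = some 0 := by
    intro q hq
    refine PySem.Dict.get?_of_mem_items d0 ?_ hd0nodup
    rw [hd0keys] at hq
    rw [hd0items]
    rcases List.mem_append.mp hq with h | h
    · obtain ⟨i, hi, rfl⟩ := List.mem_map.mp h
      exact List.mem_append_left _ (List.mem_map.mpr ⟨i, hi, rfl⟩)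
    · simp at h
      simp [h]
  -- rewrite A's loop body through the common key function kf
  have hbodyA : (fun (d : PySem.Dict String Int) (p : Int × Int) =>
      if p.1 ≤ bins then
        d.insert ("Freq_" ++ PySem.Int.toStr p.1) (d.getD ("Freq_" ++ PySem.Int.toStr p.1) 0 + p.2)
      else d.insert plus (d.getD plus 0 + p.2))
      = (fun d p => d.insert (kf p.1) (d.getD (kf p.1) 0 + p.2)) := by
    funext d p
    by_cases h : p.1 ≤ bins <;> simp [hkf, hF, h]
  rw [hinitA, hbodyA]
  set Afold : PySem.Dict String Int :=
    ((PySem.Dict.counter xs).items).foldl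
      (fun d p => d.insert (kf p.1) (d.getD (kf p.1) 0 + p.2)) d0 with hAfold
  have hmapkey : ((PySem.Dict.counter xs).items).map (fun p => kf p.1)
      = (PySem.Set.ofList xs).map kf := by
    rw [PySem.Dict.items_counter, List.map_map]
    rfl
  have hkeysA : Afold.keys = d0.keys := by
    rw [hAfold, PySem.Dict.keys_foldl_insert_key, hmapkey]
    apply pv_update_eq_self
    intro k hk
    obtain ⟨x, hx, rfl⟩ := List.mem_map.mp hk
    have hxs : x ∈ xs := (PySem.Set.mem_ofList xs x).mp hx
    rw [hd0keys]
    by_cases hxb : x ≤ bins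
    · refine List.mem_append_left _ (List.mem_map.mpr ⟨x, ?_, by simp [hkf, hxb]⟩)
      refine PySem.List.mem_pyRange_one.mpr ⟨?_, by omega⟩
      rcases hpre x hxs with h | h <;> omega
    · simp [hkf, hxb]
  have hnodupA : Afold.keys.Nodup :=
    PySem.Dict.nodup_keys_foldl_insert_key _ _ _ _ hd0nodup
  -- value of A's dict at each key, as an occurrence count in xs
  have hval : ∀ q ∈ d0.keys,
      Afold.getD q 0 = ((xs.filter (fun x => decide (kf x = q))).length : Int) := by
    intro q hq
    rw [hAfold, PySem.Dict.getD_eq_get?_getD,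
      pv_foldl_acc_get? (fun p => kf p.1) (fun p => p.2) ((PySem.Dict.counter xs).items) d0 q]
    by_cases hm : q ∈ ((PySem.Dict.counter xs).items).map (fun p => kf p.1)
    · rw [if_pos hm]
      have hd0g : d0.getD q 0 = 0 := by
        rw [PySem.Dict.getD_eq_get?_getD, hq0 q hq]
        rfl
      have hsum : ((((PySem.Dict.counter xs).items).filter (fun p => decide (kf p.1 = q))).map
            (fun p => p.2)).sum
          = ((xs.filter (fun x => decide (kf x = q))).length : Int) := by
        rw [PySem.Dict.items_counter, List.filter_map, List.map_map]
        have hcomp : ((PySem.Set.ofList xs).filter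
              ((fun p : Int × Int => decide (kf p.1 = q)) ∘ (fun k => (k, (xs.count k : Int))))).map
              ((fun p : Int × Int => p.2) ∘ (fun k => (k, (xs.count k : Int))))
            = ((PySem.Set.ofList xs).filter (fun v => decide (kf v = q))).map
              (fun v => (xs.count v : Int)) := rfl
        rw [hcomp, pv_sum_count_filter xs (fun v => decide (kf v = q))]
      rw [hd0g, hsum]
      simp
    · rw [if_neg hm, hq0 q hq]
      have hnil : xs.filter (fun x => decide (kf x = q)) = [] := by
        rw [List.filter_eq_nil_iff]
        intro x hx hdec
        apply hm
        rw [hmapkey]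
        exact List.mem_map.mpr ⟨x, (PySem.Set.mem_ofList xs x).mpr hx, by simpa using hdec⟩
      simp [hnil]
  have hvalF : ∀ j ∈ rk, Afold.getD (F j) 0 = ((PySem.List.count xs j : Nat) : Int) := by
    intro j hj
    obtain ⟨hj1, hj2⟩ := hmem j hj
    rw [hval (F j) (by rw [hd0keys]; exact List.mem_append_left _ (List.mem_map.mpr ⟨j, hj, rfl⟩))]
    have hfil : xs.filter (fun x => decide (kf x = F j)) = xs.filter (fun x => decide (x = j)) := by
      apply List.filter_congr
      intro x hx
      have hprex := hpre x hx
      rw [decide_eq_decide]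
      constructor
      · intro hkfx
        by_cases hxb : x ≤ bins
        · have hx1 : 1 ≤ x := by rcases hprex with h | h <;> omega
          simp only [hkf] at hkfx
          rw [if_pos hxb] at hkfx
          exact pv_F_inj x j (by omega) (by omega) hkfx
        · exfalso
          simp only [hkf] at hkfx
          rw [if_neg hxb] at hkfx
          exact pv_F_ne_plus j (bins + 1) (by omega) hkfx.symm
      · intro hxj
        subst hxj
        simp [hkf, hj2]
    rw [hfil, PySem.List.count_eq]
    congr 1
    rw [← List.countP_eq_length_filter]
    simp [List.count, beq_eq_decide]
  have hvalP : Afold.getD plus 0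
      = (0 : Int) + ((List.countP (fun x => decide (bins < x)) xs : Nat) : Int) := by
    rw [hval plus (by rw [hd0keys]; simp)]
    have hfil : xs.filter (fun x => decide (kf x = plus))
        = xs.filter (fun x => decide (bins < x)) := by
      apply List.filter_congr
      intro x hx
      have hprex := hpre x hx
      rw [decide_eq_decide]
      constructor
      · intro hkfx
        by_cases hxb : x ≤ bins
        · exfalso
          have hx1 : 1 ≤ x := by rcases hprex with h | h <;> omega
          simp only [hkf] at hkfx
          rw [if_pos hxb] at hkfx
          exact pv_F_ne_plus x (bins + 1) (by omega) hkfx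
        · omega
      · intro hlt
        have hxb : ¬ x ≤ bins := by omega
        simp only [hkf]
        rw [if_neg hxb]
    rw [hfil, List.countP_eq_length_filter]
    exact (zero_add _).symm
  -- B's dict: its item list computed directly
  set cnt := xs.foldl (fun acc x => if bins < x then acc + 1 else acc) (0 : Int) with hcnt
  have hcnt' : cnt = (0 : Int) + ((List.countP (fun x => decide (bins < x)) xs : Nat) : Int) := by
    rw [hcnt, PySem.List.foldl_ite_add_one (fun x => bins < x) xs 0]
  have hbodyB : (fun (d : PySem.Dict String Int) (i : Int) =>
      d.insert ("Freq_" ++ PySem.Int.toStr i) ((PySem.List.count xs i : Nat) : Int))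
      = (fun d i => d.insert (F i) ((PySem.List.count xs i : Nat) : Int)) := rfl
  rw [hbodyB]
  have hinner_items : (rk.foldl (fun d i => d.insert (F i) ((PySem.List.count xs i : Nat) : Int))
        PySem.Dict.empty).items
      = rk.map (fun i => (F i, ((PySem.List.count xs i : Nat) : Int))) := by
    rw [PySem.Dict.items_foldl_insert_fresh rk F
      (fun i => ((PySem.List.count xs i : Nat) : Int)) PySem.Dict.empty
      (by intro a _; simp [pysem]) hnodmap]
    simp [pysem]
    rfl
  have hinner_keys : (rk.foldl (fun d i => d.insert (F i) ((PySem.List.count xs i : Nat) : Int))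
        PySem.Dict.empty).keys = rk.map F := by
    simp only [PySem.Dict.keys, hinner_items, List.map_map]
    rfl
  have hBcont : (rk.foldl (fun d i => d.insert (F i) ((PySem.List.count xs i : Nat) : Int))
        PySem.Dict.empty).contains plus = false := by
    rw [PySem.Dict.contains_eq_decide_mem_keys, hinner_keys]
    simpa using hplusnot
  rw [PySem.Dict.items_insert_of_not_contains _ cnt hBcont, hinner_items]
  by_cases hxs : xs = []
  · rw [if_pos hxs, hd0items]
    subst hxs
    have h0 : cnt = 0 := by
      rw [hcnt']
      simp
    rw [h0]
    simp [PySem.List.count_eq]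
  · rw [if_neg hxs]
    have hAitems : Afold.items = (rk.map F ++ [plus]).map (fun k => (k, Afold.getD k 0)) := by
      rw [PySem.Dict.items_eq_map_keys Afold hnodupA 0, hkeysA, hd0keys]
    rw [hAitems, List.map_append, List.map_map]
    congr 1
    · apply List.map_congr_left
      intro i hi
      simp only [Function.comp_apply]
      rw [hvalF i hi]
    · simp only [List.map_cons, List.map_nil]
      rw [hvalP, ← hcnt']
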